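-- pv_equiv track=rewrite | github.com/gwlsrm/lsrm_pipeline_calculation | operations/json_to_tsv_operation.py | _get_list_size
-- ===== SOURCE A (Python) =====
-- import typing as tp
--
-- def _get_list_size(d: tp.Dict[str, tp.List[tp.Any]]) -> int:
--     n = None
--     for _, arr in d.items():
--         if n is None:
--             n = len(arr)
--         else:
--             assert n == len(arr)
--     return n
-- ===== SOURCE B (Python) =====
-- import typing as tp
--
-- def _check_sizes(vals: tp.List[tp.List[tp.Any]]) -> tp.Optional[int]:
--     # divide and conquer: common length of each half, merged with an assert
--     if not vals:
--         return None
--     if len(vals) == 1: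
--         return len(vals[0])
--     mid = len(vals) // 2
--     left = _check_sizes(vals[:mid])
--     right = _check_sizes(vals[mid:])
--     assert left == right
--     return right
--
-- def _get_list_size(d: tp.Dict[str, tp.List[tp.Any]]) -> int:
--     return _check_sizes(list(d.values()))
-- ===== Notes on version B (the rewrite author's own statement) =====
-- stated objective: alternative
-- what changed: Replaces A's single left-to-right loop with an Optional running accumulator by divide-and-conquer recursion: the value lists are split in half, the common length of each half is computed recursively, and the two are merged with an assert, so on uniform input every merge agrees and the last list's length bubbles up.
import Mathlib
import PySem

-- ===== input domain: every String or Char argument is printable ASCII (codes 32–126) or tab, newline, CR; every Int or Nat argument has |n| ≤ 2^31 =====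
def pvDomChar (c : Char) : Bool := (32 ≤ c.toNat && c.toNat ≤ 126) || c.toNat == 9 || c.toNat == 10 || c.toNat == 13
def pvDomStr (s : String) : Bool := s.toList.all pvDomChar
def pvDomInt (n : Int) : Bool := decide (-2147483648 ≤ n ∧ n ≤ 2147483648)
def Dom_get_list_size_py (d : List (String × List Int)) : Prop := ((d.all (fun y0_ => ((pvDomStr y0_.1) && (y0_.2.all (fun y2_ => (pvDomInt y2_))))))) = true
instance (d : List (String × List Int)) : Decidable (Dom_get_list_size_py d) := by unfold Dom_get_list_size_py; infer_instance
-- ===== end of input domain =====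

-- B replaces A's left-to-right accumulator loop with divide-and-conquer recursion: the common
-- length of each half is computed recursively and merged with an assert (objective: alternative).


-- ===== PORT A =====
-- loop accumulator n : Option Int; 'assert n == len(arr)' raises AssertionError on a mismatch
-- (those inputs are outside Pre_ below; there the port just keeps n).
def get_list_size_py_loop (n : Option Int) (items : List (String × List Int)) : Option Int :=
  match items with
  | [] => n
  | (_, arr) :: rest =>
    match n with
    | none => get_list_size_py_loop (some (arr.length : Int)) rest
    | some m => get_list_size_py_loop (some m) rest  -- assert m == len(arr): raise outside Pre_

def get_list_size_py (d : List (String × List Int)) : Option Int :=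
  get_list_size_py_loop none d

-- ===== PORT B =====
-- _check_sizes: divide-and-conquer on the list of values; 'assert left == right' raises outside
-- Pre_ (the port keeps right there).
def check_sizes : List (List Int) → Option Int
  | [] => none
  | [v] => some (v.length : Int)
  | a :: b :: rest =>
    let mid := (a :: b :: rest).length / 2
    let _left := check_sizes ((a :: b :: rest).take mid)
    let right := check_sizes ((a :: b :: rest).drop mid)
    right  -- assert left == right: raise outside Pre_
termination_by vals => vals.length
decreasing_by
  · simp [List.length_take]; omega
  · simp [List.length_drop]; omega

def get_list_size_py_alt (d : List (String × List Int)) : Option Int :=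
  check_sizes (d.map Prod.snd)

-- ===== PRECONDITION & SPEC =====
-- Pre_ excludes exactly the inputs on which A (and B alike) raises AssertionError:
-- dicts whose list values do not all share one length.
def Pre_get_list_size_py (d : List (String × List Int)) : Prop :=
  ∀ p ∈ d, ∀ q ∈ d, p.2.length = q.2.length
instance (d : List (String × List Int)) : Decidable (Pre_get_list_size_py d) := by
  unfold Pre_get_list_size_py; infer_instance

def pvWitness_get_list_size_py : (List (String × List Int)) := [("a", [1, 2]), ("b", [3, 4])]

def Spec_get_list_size_py (d : List (String × List Int)) (out : Option Int) : Prop := out = get_list_size_py_alt d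
instance (d : List (String × List Int)) (out : Option Int) : Decidable (Spec_get_list_size_py d out) := by unfold Spec_get_list_size_py; infer_instance

-- ===== CLAIM (what is proved, stated in full; the proofs are below) =====
def Claim_equal_get_list_size_py : Prop := ∀ (d : List (String × List Int)), Dom_get_list_size_py d → Pre_get_list_size_py d → Spec_get_list_size_py d (get_list_size_py d)

-- ===== LEMMAS AND PROOFS =====

-- A's loop with a settled accumulator never changes it.
theorem get_list_size_py_loop_some (m : Int) (items : List (String × List Int)) :
    get_list_size_py_loop (some m) items = some m := by
  induction items with
  | nil => rfl
  | cons h t ih => simpa [get_list_size_py_loop] using ih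

-- A returns the length of the FIRST value (or none on the empty dict).
theorem get_list_size_py_eq_head (d : List (String × List Int)) :
    get_list_size_py d = d.head?.map (fun p => (p.2.length : Int)) := by
  cases d with
  | nil => rfl
  | cons h t => simp [get_list_size_py, get_list_size_py_loop, get_list_size_py_loop_some]

-- B's merged result is always the right half's, whose last element is the list's last,
-- so check_sizes returns the length of the LAST value (or none on the empty list).
theorem check_sizes_eq_getLast (vals : List (List Int)) :
    check_sizes vals = vals.getLast?.map (fun v => (v.length : Int)) := by
  induction vals using check_sizes.induct with
  | case1 => simp [check_sizes]
  | case2 v => simp [check_sizes]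
  | case3 a b rest mid ihl ihr =>
    rw [check_sizes]
    show check_sizes ((a :: b :: rest).drop ((a :: b :: rest).length / 2)) = _
    rw [ihr]
    show ((a :: b :: rest).drop ((a :: b :: rest).length / 2)).getLast?.map _ = _
    rw [List.getLast?_drop, if_neg (by simp only [List.length_cons]; omega)]

-- ===== VERDICT (by name: the statement is the Claim_ definition above) =====
theorem get_list_size_py_spec : Claim_equal_get_list_size_py := by
  intro d _ hp
  unfold Spec_get_list_size_py
  rw [get_list_size_py_eq_head]
  unfold get_list_size_py_alt
  rw [check_sizes_eq_getLast, List.getLast?_map, Option.map_map]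
  cases d with
  | nil => rfl
  | cons h t =>
    have hmem : (h :: t).getLast (by simp) ∈ h :: t := List.getLast_mem _
    have hlen : ((h :: t).getLast (by simp)).2.length = h.2.length :=
      hp _ hmem h (List.mem_cons_self ..)
    simp [List.getLast?_eq_some_getLast, hlen, Function.comp]
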